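-- pv_equiv track=rewrite | github.com/liupengsay/PyIsTheBestLang | source/mathmatics/lexico_graphical_order/template.py | get_kth_subset_comb
-- ===== SOURCE A (Python) =====
-- import math
--
-- def get_kth_subset_comb(n, m, k):
--     # Select the k-th comb of m elements from the set [1,...,n] to arrange the selection
--     # assert k <= math.comb(n, m)
--     nums = list(range(1, n + 1))
--     ans = []
--     while k and nums and len(ans) < m:
--         length = len(nums)
--         c = math.comb(length - 1, m - len(ans) - 1)
--         if c >= k:
--             ans.append(nums.pop(0))
--         else:
--             k -= c
--             nums.pop(0)
--     return ans
-- ===== SOURCE B (Python) =====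
-- import math
--
-- def get_kth_subset_comb(n, m, k):
--     # Per-slot binary search (hockey-stick identity): the number of m-combinations of
--     # {prev+1..n} whose first element is <= v is C(n-prev, r) - C(n-v, r), so each of the
--     # m output values is found by bisection instead of scanning candidates one by one.
--     ans = []
--     prev = 0
--     while k and len(ans) < m and prev < n:
--         r = m - len(ans)
--         total = math.comb(n - prev, r)
--         if k > total:
--             # fewer than k combinations remain
--             break
--         lo, hi = prev + 1, n
--         while lo < hi:
--             mid = (lo + hi) // 2
--             if math.comb(n - mid, r) <= total - k:
--                 hi = mid
--             else:
--                 lo = mid + 1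
--         ans.append(lo)
--         k -= total - math.comb(n - lo + 1, r)
--         prev = lo
--     return ans
-- ===== Notes on version B (the rewrite author's own statement) =====
-- stated objective: alternative
-- what changed: Replaces A's per-candidate scan (pop(0) over 1..n with an include/skip test per element) by a per-slot bisection: each of the m output values is found by binary search on the closed-form cumulative count C(n-prev,r) - C(n-v,r) given by the hockey-stick identity.
import Mathlib
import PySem

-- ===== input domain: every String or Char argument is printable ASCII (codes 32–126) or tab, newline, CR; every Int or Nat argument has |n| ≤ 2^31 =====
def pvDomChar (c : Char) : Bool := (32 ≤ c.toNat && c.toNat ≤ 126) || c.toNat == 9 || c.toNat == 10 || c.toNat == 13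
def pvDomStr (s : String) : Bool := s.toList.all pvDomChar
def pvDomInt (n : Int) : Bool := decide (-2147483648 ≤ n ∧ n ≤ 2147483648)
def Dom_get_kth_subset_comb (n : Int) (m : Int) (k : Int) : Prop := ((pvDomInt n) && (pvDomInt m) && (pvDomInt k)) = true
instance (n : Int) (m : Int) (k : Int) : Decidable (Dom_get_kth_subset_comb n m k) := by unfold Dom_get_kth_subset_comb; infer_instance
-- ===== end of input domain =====

-- B replaces A's per-candidate include/skip scan by a per-slot binary search on the
-- closed-form cumulative count C(n-prev,r) - C(n-v,r); same return value on all inputs.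

-- ===== PORT A =====
-- math.comb a b (both arguments are nonnegative wherever A calls it)
def pycomb (a : Int) (b : Int) : Int :=
  if 0 ≤ a ∧ 0 ≤ b then (Nat.choose a.toNat b.toNat : Int) else 0

-- the while loop of A: nums shrinks by pop(0) each iteration
def goA : List Int → Int → Int → List Int → List Int
  | [], _, _, ans => ans
  | h :: rest, m, k, ans =>
    if k ≠ 0 ∧ (ans.length : Int) < m then
      let c := pycomb (((h :: rest).length : Int) - 1) (m - (ans.length : Int) - 1)
      if c ≥ k then goA rest m k (ans ++ [h])
      else goA rest m (k - c) ans
    else ans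

def get_kth_subset_comb (n : Int) (m : Int) (k : Int) : List Int :=
  goA (PySem.List.pyRange 1 (n + 1) 1) m k []

-- ===== PORT B =====
-- inner `while lo < hi` bisection of Source B; fuel (hi-lo).toNat bounds the iterations
def bsB (n r bound : Int) : Nat → Int → Int → Int
  | 0, lo, _ => lo
  | f + 1, lo, hi =>
    if lo < hi then
      let mid := PySem.Int.floordiv (lo + hi) 2
      if pycomb (n - mid) r ≤ bound then bsB n r bound f lo mid
      else bsB n r bound f (mid + 1) hi
    else lo

-- outer `while k and len(ans) < m and prev < n` of Source B; prev strictly increases, fuel n.toNat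
def goB (n m : Int) : Nat → Int → Int → List Int → List Int
  | 0, _, _, ans => ans
  | f + 1, prev, k, ans =>
    if k ≠ 0 ∧ (ans.length : Int) < m ∧ prev < n then
      let r := m - (ans.length : Int)
      let total := pycomb (n - prev) r
      if total < k then ans
      else
        let v := bsB n r (total - k) (n - (prev + 1)).toNat (prev + 1) n
        goB n m f v (k - (total - pycomb (n - v + 1) r)) (ans ++ [v])
    else ans

def get_kth_subset_comb_alt (n : Int) (m : Int) (k : Int) : List Int :=
  goB n m n.toNat 0 k []

-- ===== PRECONDITION & SPEC =====
def Spec_get_kth_subset_comb (n : Int) (m : Int) (k : Int) (out : List Int) : Prop := out = get_kth_subset_comb_alt n m k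
instance (n : Int) (m : Int) (k : Int) (out : List Int) : Decidable (Spec_get_kth_subset_comb n m k out) := by unfold Spec_get_kth_subset_comb; infer_instance

-- ===== CLAIM (what is proved, stated in full; the proofs are below) =====
def Claim_equal_get_kth_subset_comb : Prop := ∀ (n : Int) (m : Int) (k : Int), Dom_get_kth_subset_comb n m k → Spec_get_kth_subset_comb n m k (get_kth_subset_comb n m k)

-- ===== LEMMAS AND PROOFS =====

lemma pycomb_nonneg (a b : Int) : 0 ≤ pycomb a b := by
  unfold pycomb; split
  · exact Int.natCast_nonneg _
  · exact le_refl 0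

lemma pycomb_mono (a a' b : Int) (h : a ≤ a') : pycomb a b ≤ pycomb a' b := by
  unfold pycomb
  split_ifs with h1 h2 h2
  · exact_mod_cast Nat.choose_le_choose b.toNat (by omega)
  · omega
  · exact Int.natCast_nonneg _
  · exact le_refl 0

-- Pascal's rule on pycomb (the hockey-stick step the segment proof uses)
lemma pycomb_pascal (a r : Int) (ha : 1 ≤ a) (hr : 1 ≤ r) :
    pycomb a r = pycomb (a - 1) r + pycomb (a - 1) (r - 1) := by
  unfold pycomb
  rw [if_pos ⟨by omega, by omega⟩, if_pos ⟨by omega, by omega⟩, if_pos ⟨by omega, by omega⟩]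
  have hA : a.toNat = (a - 1).toNat + 1 := by omega
  have hR : r.toNat = (r - 1).toNat + 1 := by omega
  have h := Nat.choose_succ_succ ((a - 1).toNat) ((r - 1).toNat)
  have h2 := congrArg (fun x : Nat => (x : Int)) h
  push_cast at h2
  rw [hA, hR]
  linarith

lemma pycomb_zero_left (r : Int) (hr : 1 ≤ r) : pycomb 0 r = 0 := by
  unfold pycomb
  rw [if_pos ⟨le_refl 0, by omega⟩, Nat.choose_eq_zero_of_lt (by omega)]
  rfl

lemma goA_stop (nums : List Int) (m k : Int) (ans : List Int)
    (h : m ≤ (ans.length : Int)) : goA nums m k ans = ans := by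
  cases nums with
  | nil => rfl
  | cons x rest => unfold goA; rw [if_neg]; intro ⟨_, h2⟩; omega

lemma goA_k0 (nums : List Int) (m : Int) (ans : List Int) :
    goA nums m 0 ans = ans := by
  cases nums with
  | nil => rfl
  | cons x rest => unfold goA; rw [if_neg]; intro ⟨h1, _⟩; exact h1 rfl

-- binary search returns the least v in [lo,hi] with pycomb (n-v) r ≤ bound, given it holds at hi
lemma bsB_spec (n r bound : Int) :
    ∀ (f : Nat) (lo hi : Int), lo ≤ hi → (hi - lo).toNat ≤ f →
      pycomb (n - hi) r ≤ bound →
      lo ≤ bsB n r bound f lo hi ∧ bsB n r bound f lo hi ≤ hi ∧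
      pycomb (n - bsB n r bound f lo hi) r ≤ bound ∧
      (∀ y, lo ≤ y → y < bsB n r bound f lo hi → ¬ pycomb (n - y) r ≤ bound) := by
  intro f
  induction f with
  | zero =>
    intro lo hi hle hf hP
    have hlh : hi = lo := by omega
    subst hlh
    simp only [bsB]
    exact ⟨le_refl _, le_refl _, hP, fun y h1 h2 => absurd h2 (by omega)⟩
  | succ f ih =>
    intro lo hi hle hf hP
    simp only [bsB]
    by_cases hlt : lo < hi
    · rw [if_pos hlt]
      have hb : lo ≤ PySem.Int.floordiv (lo + hi) 2 ∧ PySem.Int.floordiv (lo + hi) 2 < hi := by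
        rw [PySem.Int.floordiv_eq_ediv_of_pos (by omega)]
        omega
      by_cases hPm : pycomb (n - PySem.Int.floordiv (lo + hi) 2) r ≤ bound
      · rw [if_pos hPm]
        obtain ⟨i1, i2, i3, i4⟩ := ih lo (PySem.Int.floordiv (lo + hi) 2) (by omega) (by omega) hPm
        exact ⟨i1, by omega, i3, i4⟩
      · rw [if_neg hPm]
        obtain ⟨i1, i2, i3, i4⟩ := ih (PySem.Int.floordiv (lo + hi) 2 + 1) hi (by omega) (by omega) hP
        refine ⟨by omega, i2, i3, ?_⟩
        intro y hy1 hy2 hPy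
        by_cases hym : y ≤ PySem.Int.floordiv (lo + hi) 2
        · exact hPm (le_trans (pycomb_mono _ _ _ (by omega)) hPy)
        · exact i4 y (by omega) hy2 hPy
    · rw [if_neg hlt]
      have hlh : hi = lo := by omega
      subst hlh
      exact ⟨le_refl _, le_refl _, hP, fun y h1 h2 => absurd h2 (by omega)⟩

-- A skips every candidate y ∈ [x,v) on which pycomb (n-y) r > T - k0, carrying
-- k = k0 - (T - pycomb (n-y+1) r); closed under the hockey-stick identity.
lemma skip_to (n m T k0 : Int) (ans : List Int) (hlen : (ans.length : Int) < m) :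
    ∀ (t : Nat) (x : Int), x + (t : Int) ≤ n + 1 →
      (∀ y, x ≤ y → y < x + (t : Int) → ¬ pycomb (n - y) (m - (ans.length : Int)) ≤ T - k0) →
      goA (PySem.List.pyRange x (n + 1) 1) m
          (k0 - (T - pycomb (n - x + 1) (m - (ans.length : Int)))) ans
        = goA (PySem.List.pyRange (x + (t : Int)) (n + 1) 1) m
          (k0 - (T - pycomb (n - (x + (t : Int)) + 1) (m - (ans.length : Int)))) ans := by
  intro t
  induction t with
  | zero => intro x _ _; norm_num
  | succ t ih =>
    intro x hxt hskip
    have hc1 : x + ((t + 1 : Nat) : Int) = (x + 1) + (t : Int) := by push_cast; ring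
    rw [hc1]
    set r := m - (ans.length : Int) with hr
    have hxn : x ≤ n := by
      have : ((t + 1 : Nat) : Int) ≥ 1 := by push_cast; omega
      omega
    have hPx : ¬ pycomb (n - x) r ≤ T - k0 :=
      hskip x (le_refl _) (by push_cast; omega)
    have hpas : pycomb (n - x + 1) r = pycomb (n - x) r + pycomb (n - x) (r - 1) := by
      have := pycomb_pascal (n - x + 1) r (by omega) (by omega)
      simpa using this
    rw [PySem.List.pyRange_one_cons (by omega)]
    conv_lhs => unfold goA
    have hknz : k0 - (T - pycomb (n - x + 1) r) ≠ 0 := by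
      rw [hpas]
      have := pycomb_nonneg (n - x) (r - 1)
      omega
    rw [if_pos ⟨hknz, hlen⟩]
    have hc : pycomb (((x :: PySem.List.pyRange (x + 1) (n + 1) 1).length : Int) - 1)
        (m - (ans.length : Int) - 1) = pycomb (n - x) (r - 1) := by
      congr 1
      simp only [List.length_cons]
      rw [PySem.List.length_pyRange_one]
      push_cast; omega
    rw [hc]
    have hcge : ¬ pycomb (n - x) (r - 1) ≥ k0 - (T - pycomb (n - x + 1) r) := by
      rw [hpas]; omega
    rw [if_neg hcge]
    have hknew : k0 - (T - pycomb (n - x + 1) r) - pycomb (n - x) (r - 1)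
        = k0 - (T - pycomb (n - (x + 1) + 1) r) := by
      rw [hpas]; ring_nf
    rw [hknew]
    rw [ih (x + 1)
      (by rw [← hc1] at *; push_cast at hxt ⊢; omega)
      (fun y h1 h2 => hskip y (by omega) (by push_cast at h2 ⊢; omega))]

-- whole-loop correspondence: one outer iteration of B = a skip segment + one take of A
lemma main_loop (n m : Int) :
    ∀ (fuel : Nat) (prev k : Int) (ans : List Int), 0 ≤ prev → n - prev ≤ (fuel : Int) →
      goA (PySem.List.pyRange (prev + 1) (n + 1) 1) m k ans = goB n m fuel prev k ans := by
  intro fuel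
  induction fuel with
  | zero =>
    intro prev k ans _ hf
    rw [PySem.List.pyRange_one_eq_nil (by push_cast at hf; omega)]
    rfl
  | succ fuel ih =>
    intro prev k ans hprev hf
    unfold goB
    by_cases hcond : k ≠ 0 ∧ (ans.length : Int) < m ∧ prev < n
    · obtain ⟨hk, hlen, hpn⟩ := hcond
      rw [if_pos ⟨hk, hlen, hpn⟩]
      set r := m - (ans.length : Int) with hrdef
      set T := pycomb (n - prev) r with hTdef
      by_cases hTk : T < k
      · rw [if_pos hTk]
        have hall : ∀ y, prev + 1 ≤ y → y < prev + 1 + ((n - prev).toNat : Int) →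
            ¬ pycomb (n - y) r ≤ T - k := by
          intro y _ _ h
          have := pycomb_nonneg (n - y) r
          omega
        have hst := skip_to n m T k ans hlen (n - prev).toNat (prev + 1)
          (by omega) hall
        have he : prev + 1 + ((n - prev).toNat : Int) = n + 1 := by omega
        rw [he] at hst
        have hstart : k - (T - pycomb (n - (prev + 1) + 1) r) = k := by
          rw [hTdef]; ring_nf
        rw [hstart] at hst
        rw [hst, PySem.List.pyRange_one_eq_nil (by omega)]
        rfl
      · rw [if_neg hTk]
        -- binary search
        have hbs := bsB_spec n r (T - k) ((n - (prev + 1)).toNat) (prev + 1) n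
          (by omega) (by omega)
          (by
            have h0 : pycomb (n - n) r = 0 := by
              rw [show n - n = (0 : Int) by ring, pycomb_zero_left r (by omega)]
            omega)
        set v := bsB n r (T - k) ((n - (prev + 1)).toNat) (prev + 1) n with hvdef
        obtain ⟨hv1, hv2, hPv, hbelow⟩ := hbs
        -- skip segment up to v
        have hst := skip_to n m T k ans hlen (v - (prev + 1)).toNat (prev + 1)
          (by omega)
          (by
            intro y h1 h2
            exact hbelow y h1 (by omega))
        have he : prev + 1 + (((v - (prev + 1)).toNat : Int)) = v := by omega
        rw [he] at hst
        have hstart : k - (T - pycomb (n - (prev + 1) + 1) r) = k := by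
          rw [hTdef]; ring_nf
        rw [hstart] at hst
        rw [hst]
        -- take step at v
        set Kv := k - (T - pycomb (n - v + 1) r) with hKv
        have hpas : pycomb (n - v + 1) r = pycomb (n - v) r + pycomb (n - v) (r - 1) := by
          have := pycomb_pascal (n - v + 1) r (by omega) (by omega)
          simpa using this
        have hKvnz : Kv ≠ 0 := by
          by_cases hveq : v = prev + 1
          · rw [hKv, hveq]
            have : pycomb (n - (prev + 1) + 1) r = T := by
              rw [hTdef]; congr 1; ring
            rw [this]; omega
          · have := hbelow (v - 1) (by omega) (by omega)
            rw [hKv, hpas]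
            have h2 : ¬ pycomb (n - (v - 1)) r ≤ T - k := this
            have h3 : n - (v - 1) = n - v + 1 := by ring
            rw [h3, hpas] at h2
            have := pycomb_nonneg (n - v) (r - 1)
            omega
        rw [PySem.List.pyRange_one_cons (by omega)]
        unfold goA
        rw [if_pos ⟨hKvnz, hlen⟩]
        have hc : pycomb (((v :: PySem.List.pyRange (v + 1) (n + 1) 1).length : Int) - 1)
            (m - (ans.length : Int) - 1) = pycomb (n - v) (r - 1) := by
          congr 1
          simp only [List.length_cons]
          rw [PySem.List.length_pyRange_one]
          push_cast; omega
        rw [hc]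
        have htake : pycomb (n - v) (r - 1) ≥ Kv := by
          rw [hKv, hpas]; omega
        rw [if_pos htake]
        exact ih v Kv (ans ++ [v]) (by omega) (by omega)
    · rw [if_neg hcond]
      by_cases hk : k = 0
      · subst hk; exact goA_k0 _ _ _
      · by_cases hlen : (ans.length : Int) < m
        · have hpn : ¬ prev < n := by tauto
          rw [PySem.List.pyRange_one_eq_nil (by omega)]
          rfl
        · exact goA_stop _ _ _ _ (by omega)

-- ===== VERDICT (by name: the statement is the Claim_ definition above) =====
theorem get_kth_subset_comb_spec : Claim_equal_get_kth_subset_comb := by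
  intro n m k _
  unfold Spec_get_kth_subset_comb get_kth_subset_comb get_kth_subset_comb_alt
  have := main_loop n m n.toNat 0 k [] (le_refl 0) (by omega)
  simpa using this
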